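-- pv_equiv track=rewrite | github.com/Sinan-Esencan/Python-Programming-MOOC-2025 | part07-17/string_helper.py | split_in_half
-- ===== SOURCE A (Python) =====
-- def split_in_half(orig_string: str):
--     str1 = ""
--     str2 = ""
--     first_half = len(orig_string) // 2
--     for i, char in enumerate(orig_string):
--         if i < first_half:
--             str1 += char
--         else:
--             str2 += char
--     return str1, str2
-- ===== SOURCE B (Python) =====
-- def split_in_half(orig_string: str):
--     h = len(orig_string) // 2
--     return orig_string[:h], orig_string[h:]
-- ===== Notes on version B (the rewrite author's own statement) =====
-- stated objective: simpler
-- what changed: Replaces the per-character enumerate loop with two-branch string concatenation by a midpoint computation and two direct slices, no loop at all.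
import Mathlib
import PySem

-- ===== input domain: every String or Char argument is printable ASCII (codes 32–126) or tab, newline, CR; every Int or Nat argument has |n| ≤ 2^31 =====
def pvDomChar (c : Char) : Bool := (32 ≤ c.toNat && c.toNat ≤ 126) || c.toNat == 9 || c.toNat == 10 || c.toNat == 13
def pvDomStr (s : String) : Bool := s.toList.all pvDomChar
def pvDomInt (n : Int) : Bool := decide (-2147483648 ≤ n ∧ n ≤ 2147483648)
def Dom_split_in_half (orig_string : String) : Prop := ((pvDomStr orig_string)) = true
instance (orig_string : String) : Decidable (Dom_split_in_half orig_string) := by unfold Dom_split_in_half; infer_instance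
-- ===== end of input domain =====

-- B replaces A's per-character enumerate loop by a midpoint computation and two direct slices (simpler).

-- ===== PORT A =====
-- str1 += char is ported as appending the character to the accumulated list of chars
-- (exact: Python string concatenation on the code-point list), final String.ofList at return.
def split_in_half (orig_string : String) : String × String :=
  let first_half : Int := PySem.Int.floordiv (orig_string.toList.length : Int) 2
  let p := (PySem.List.enumerate orig_string.toList).foldl
    (fun (acc : List Char × List Char) (ic : Int × Char) =>
      if ic.1 < first_half then (acc.1 ++ [ic.2], acc.2) else (acc.1, acc.2 ++ [ic.2]))
    ([], [])
  (String.ofList p.1, String.ofList p.2)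

-- ===== PORT B =====
def split_in_half_alt (orig_string : String) : String × String :=
  let h : Int := PySem.Int.floordiv (orig_string.toList.length : Int) 2
  (String.ofList (PySem.List.slice orig_string.toList none (some h)),
   String.ofList (PySem.List.slice orig_string.toList (some h) none))

-- ===== PRECONDITION & SPEC =====
def Spec_split_in_half (orig_string : String) (out : String × String) : Prop := out = split_in_half_alt orig_string
instance (orig_string : String) (out : String × String) : Decidable (Spec_split_in_half orig_string out) := by unfold Spec_split_in_half; infer_instance

-- ===== CLAIM (what is proved, stated in full; the proofs are below) =====
def Claim_equal_split_in_half : Prop := ∀ (orig_string : String), Dom_split_in_half orig_string → Spec_split_in_half orig_string (split_in_half orig_string)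

-- ===== LEMMAS AND PROOFS =====

/-- The enumerate fold with threshold `h`, started at index `s` with accumulators
`(a, b)`, appends the first `(h - s).toNat` characters to `a` and the rest to `b`. -/
lemma split_fold_key (l : List Char) : ∀ (s h : Int) (a b : List Char),
    (PySem.List.enumerate l s).foldl
      (fun (acc : List Char × List Char) (ic : Int × Char) =>
        if ic.1 < h then (acc.1 ++ [ic.2], acc.2) else (acc.1, acc.2 ++ [ic.2]))
      (a, b)
    = (a ++ l.take (h - s).toNat, b ++ l.drop (h - s).toNat) := by
  induction l with
  | nil => intro s h a b; simp [PySem.List.enumerate_nil]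
  | cons c t ih =>
    intro s h a b
    rw [PySem.List.enumerate_cons]
    simp only [List.foldl_cons]
    by_cases hc : s < h
    · have h1 : (h - s).toNat = (h - (s + 1)).toNat + 1 := by omega
      rw [if_pos hc, ih (s + 1) h (a ++ [c]) b, h1]
      simp
    · have h0 : (h - s).toNat = 0 := by omega
      have h0' : (h - (s + 1)).toNat = 0 := by omega
      rw [if_neg hc, ih (s + 1) h a (b ++ [c])]
      simp [h0, h0']

-- ===== VERDICT (by name: the statement is the Claim_ definition above) =====
theorem split_in_half_spec : Claim_equal_split_in_half := by
  intro s _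
  unfold Spec_split_in_half split_in_half split_in_half_alt
  dsimp only
  have hnn : (0 : Int) ≤ PySem.Int.floordiv (s.toList.length : Int) 2 := by
    rw [PySem.Int.floordiv_eq_ediv_of_pos (by omega)]
    positivity
  rw [split_fold_key, PySem.List.slice_to (hb := hnn), PySem.List.slice_from (ha := hnn)]
  simp
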